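-- pv_equiv track=rewrite | github.com/king1234567891/mephala | core/base_service.py | _detect_rce
-- ===== SOURCE A (Python) =====
-- from typing import Any, Optional
--
-- def _detect_rce(path: Optional[str], body: Optional[str]) -> bool:
--     """Detect potential RCE patterns."""
--     patterns = [
--         "; cat ",
--         "; ls ",
--         "; id",
--         "; whoami",
--         "| cat ",
--         "| ls ",
--         "| id",
--         "| whoami",
--         "`cat ",
--         "`ls ",
--         "`id`",
--         "`whoami`",
--         "$(cat ",
--         "$(ls ",
--         "$(id)",
--         "$(whoami)",
--         "/bin/sh",
--         "/bin/bash",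
--         "cmd.exe",
--         "powershell",
--     ]
--     text = f"{path or ''} {body or ''}".lower()
--     return any(p in text for p in patterns)
-- ===== SOURCE B (Python) =====
-- from typing import Any, Optional
--
-- def _detect_rce(path: Optional[str], body: Optional[str]) -> bool:
--     """Detect potential RCE patterns (single left-to-right scan with a first-char index)."""
--     patterns = [
--         "; cat ",
--         "; ls ",
--         "; id",
--         "; whoami",
--         "| cat ",
--         "| ls ",
--         "| id",
--         "| whoami",
--         "`cat ",
--         "`ls ",
--         "`id`",
--         "`whoami`",
--         "$(cat ",
--         "$(ls ",
--         "$(id)",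
--         "$(whoami)",
--         "/bin/sh",
--         "/bin/bash",
--         "cmd.exe",
--         "powershell",
--     ]
--     index = {}
--     for p in patterns:
--         index.setdefault(p[0], []).append(p)
--     text = f"{path or ''} {body or ''}".lower()
--     for i, c in enumerate(text):
--         for p in index.get(c, ()):
--             if text.startswith(p, i):
--                 return True
--     return False
-- ===== Notes on version B (the rewrite author's own statement) =====
-- stated objective: alternative
-- what changed: Replaces 20 independent substring searches ('p in text' per pattern) by one left-to-right scan of the text using a dict index from first character to the patterns starting with it, checking only the matching bucket at each position.
import Mathlib
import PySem

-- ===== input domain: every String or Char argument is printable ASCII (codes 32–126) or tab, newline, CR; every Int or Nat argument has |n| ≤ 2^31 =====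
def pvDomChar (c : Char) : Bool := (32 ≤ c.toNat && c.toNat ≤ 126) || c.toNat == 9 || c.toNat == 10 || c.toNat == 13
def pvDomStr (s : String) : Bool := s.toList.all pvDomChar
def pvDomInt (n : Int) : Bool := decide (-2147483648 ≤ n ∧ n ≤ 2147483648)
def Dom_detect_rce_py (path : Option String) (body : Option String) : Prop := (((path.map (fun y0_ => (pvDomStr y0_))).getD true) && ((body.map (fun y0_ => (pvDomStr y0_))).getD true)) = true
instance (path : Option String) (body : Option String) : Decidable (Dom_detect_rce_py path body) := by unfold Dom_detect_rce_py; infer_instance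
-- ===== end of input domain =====

-- B replaces A's per-pattern substring searches by one scan of the text with a
-- first-character → patterns index (objective: alternative; return value only).

-- ===== PORT A =====
def rcePatterns : List (List Char) :=
  ["; cat ".toList, "; ls ".toList, "; id".toList, "; whoami".toList,
   "| cat ".toList, "| ls ".toList, "| id".toList, "| whoami".toList,
   "`cat ".toList, "`ls ".toList, "`id`".toList, "`whoami`".toList,
   "$(cat ".toList, "$(ls ".toList, "$(id)".toList, "$(whoami)".toList,
   "/bin/sh".toList, "/bin/bash".toList, "cmd.exe".toList, "powershell".toList]

def detect_rce_py (path : Option String) (body : Option String) : Bool :=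
  -- text = f"{path or ''} {body or ''}".lower()   ('' or '' = '', so `or ''` = getD "")
  let text := PySem.Chars.lower ((path.getD "").toList ++ ' ' :: (body.getD "").toList)
  -- any(p in text for p in patterns)
  rcePatterns.any (fun p => PySem.Chars.isIn p text)

-- ===== PORT B =====
-- index.setdefault(p[0], []).append(p); p[0] ported as headD (every pattern is a nonempty literal)
def rceIndex : PySem.Dict Char (List (List Char)) :=
  rcePatterns.foldl (fun d p => d.modify (p.headD ' ') [] (fun l => l ++ [p])) PySem.Dict.empty

def detect_rce_py_alt (path : Option String) (body : Option String) : Bool :=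
  let text := PySem.Chars.lower ((path.getD "").toList ++ ' ' :: (body.getD "").toList)
  -- for i, c in enumerate(text): for p in index.get(c, ()): if text.startswith(p, i): return True
  (PySem.List.enumerate text 0).any (fun ic =>
    (rceIndex.getD ic.2 []).any (fun p => PySem.Chars.startswith (text.drop ic.1.toNat) p))

-- ===== PRECONDITION & SPEC =====
def Spec_detect_rce_py (path : Option String) (body : Option String) (out : Bool) : Prop := out = detect_rce_py_alt path body
instance (path : Option String) (body : Option String) (out : Bool) : Decidable (Spec_detect_rce_py path body out) := by unfold Spec_detect_rce_py; infer_instance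

-- ===== CLAIM (what is proved, stated in full; the proofs are below) =====
def Claim_equal_detect_rce_py : Prop := ∀ (path : Option String) (body : Option String), Dom_detect_rce_py path body → Spec_detect_rce_py path body (detect_rce_py path body)

-- ===== LEMMAS AND PROOFS =====

theorem rcePatterns_ne_nil : ∀ p ∈ rcePatterns, p ≠ [] := by decide

-- each bucket of the index is exactly the patterns whose first character is c
theorem bucket_eq (c : Char) :
    rceIndex.getD c [] = rcePatterns.filter (fun p => p.headD ' ' == c) := by
  have h1 : rceIndex = (rcePatterns.map (fun p => (p.headD ' ', p))).foldl
      (fun d q => d.modify q.1 [] (fun l => l ++ [q.2])) PySem.Dict.empty := by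
    simp only [List.foldl_map]; rfl
  rw [h1, PySem.Dict.getD_foldl_modify_append]
  simp [List.filter_map, Function.comp_def]

theorem scan_eq (text : List Char) :
    rcePatterns.any (fun p => PySem.Chars.isIn p text) =
    (PySem.List.enumerate text 0).any (fun ic =>
      (rceIndex.getD ic.2 []).any (fun p => PySem.Chars.startswith (text.drop ic.1.toNat) p)) := by
  rw [Bool.eq_iff_iff]
  simp only [List.any_eq_true]
  constructor
  · rintro ⟨p, hp, hin⟩
    obtain ⟨j, hpre⟩ := (PySem.Chars.exists_prefix_drop_iff_isIn _ _).mpr hin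
    have hne := rcePatterns_ne_nil p hp
    obtain ⟨c, t, rfl⟩ : ∃ c t, p = c :: t := by
      cases p with
      | nil => exact absurd rfl hne
      | cons a b => exact ⟨a, b, rfl⟩
    obtain ⟨s, hs⟩ := hpre
    have hj : text[j]? = some c := by
      have h1 : (text.drop j).head? = some c := by rw [← hs]; rfl
      rwa [List.head?_drop] at h1
    have hjlt : j < text.length := (List.getElem?_eq_some_iff.mp hj).1
    refine ⟨((j : Int), c), ?_, ?_⟩
    · rw [PySem.List.mem_enumerate_iff]
      exact ⟨j, hjlt, by simp [(List.getElem?_eq_some_iff.mp hj).2]⟩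
    · refine ⟨c :: t, ?_, ?_⟩
      · rw [bucket_eq, List.mem_filter]
        exact ⟨hp, by simp⟩
      · rw [PySem.Chars.startswith_iff]
        simpa using ⟨s, hs⟩
  · rintro ⟨ic, hic, h2⟩
    obtain ⟨p, hb, hsw⟩ := h2
    rw [PySem.List.mem_enumerate_iff] at hic
    obtain ⟨k, hk, rfl⟩ := hic
    rw [bucket_eq, List.mem_filter] at hb
    refine ⟨p, hb.1, ?_⟩
    rw [← PySem.Chars.exists_prefix_drop_iff_isIn]
    refine ⟨k, ?_⟩
    have hpre := (PySem.Chars.startswith_iff _ _).mp hsw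
    simpa using hpre

-- ===== VERDICT (by name: the statement is the Claim_ definition above) =====
theorem detect_rce_py_spec : Claim_equal_detect_rce_py := by
  intro path body _
  unfold Spec_detect_rce_py detect_rce_py detect_rce_py_alt
  exact scan_eq _
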